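-- pv_equiv track=rewrite | github.com/laichunpongben/CodeJam | 2016/round_1c/senate_evacuation.py | get_evacuation_plan
-- ===== SOURCE A (Python) =====
-- def get_evacuation_plan(senates):
--     if not isinstance(senates, list):
--         raise TypeError
--
--     num_parties = len(senates)
--     remaining_senates = senates[:]
--     evacuation = []
--
--     while sum(remaining_senates) > 0:
--         sorted_index = get_sorted_index(remaining_senates)
--         party_index0, party_index1 = sorted_index[:2]
--         if remaining_senates[party_index0] > 0:
--             evacuated_party0 = get_party(party_index0)
--             evacuation.append(evacuated_party0)
--
--         if remaining_senates[party_index1] > 0: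
--             evacuated_party1 = get_party(party_index1)
--             evacuation.append(evacuated_party1)
--
--         evacuation.append(' ')
--
--         remaining_senates[party_index0] += -1
--         remaining_senates[party_index1] += -1
--
--     evacuation_plan = ''.join(evacuation)[:-1]
--     if evacuation_plan[-2] == ' ':
--         evacuation_plan = evacuation_plan[:-3] + ' ' + evacuation_plan[-3] + evacuation_plan[-1]
--
--     return evacuation_plan
--
-- def get_sorted_index(seq):
--     return sorted(range(len(seq)), key=lambda i:-seq[i])
--
-- def get_party(party_index):
--     return chr(party_index + 65)
-- ===== SOURCE B (Python) =====
-- def get_evacuation_plan(senates):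
--     if not isinstance(senates, list):
--         raise TypeError
--
--     rem = list(senates)
--     groups = []
--     while sum(rem) > 0:
--         # one linear pass tracking the two leading parties (largest count, earliest index)
--         i0 = i1 = -1
--         c0 = c1 = None
--         for i, c in enumerate(rem):
--             if c0 is None or c > c0:
--                 i1, c1 = i0, c0
--                 i0, c0 = i, c
--             elif c1 is None or c > c1:
--                 i1, c1 = i, c
--         g = ''
--         if c0 is not None and c0 > 0:
--             g += chr(i0 + 65)
--         if c1 is not None and c1 > 0:
--             g += chr(i1 + 65)
--         groups.append(g)
--         rem[i0] -= 1
--         rem[i1] -= 1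
--
--     plan = ' '.join(groups)
--     if plan[-2] == ' ':
--         plan = plan[:-3] + ' ' + plan[-3] + plan[-1]
--     return plan
-- ===== Notes on version B (the rewrite author's own statement) =====
-- stated objective: alternative
-- what changed: B replaces A's per-step full stable sort of all party indices (sorted(range(P), key=lambda i: -count[i])) by a single linear pass that tracks the two leading parties, and accumulates per-step groups in a list joined once at the end instead of A's per-letter appends with a trailing-separator trim; selection work per step drops from O(P log P) to O(P).
import Mathlib
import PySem

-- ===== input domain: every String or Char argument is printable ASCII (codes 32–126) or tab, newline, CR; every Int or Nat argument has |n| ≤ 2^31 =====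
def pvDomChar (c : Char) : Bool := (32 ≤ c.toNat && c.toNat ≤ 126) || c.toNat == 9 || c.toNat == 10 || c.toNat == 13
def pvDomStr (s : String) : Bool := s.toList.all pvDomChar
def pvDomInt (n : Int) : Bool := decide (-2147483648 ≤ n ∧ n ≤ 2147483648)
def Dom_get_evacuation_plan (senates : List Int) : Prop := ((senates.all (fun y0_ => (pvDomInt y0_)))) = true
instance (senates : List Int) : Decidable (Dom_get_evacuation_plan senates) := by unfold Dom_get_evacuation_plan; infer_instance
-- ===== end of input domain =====

-- B replaces A's per-step full stable sort of the party indices by a single linear pass that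
-- tracks the two leading parties, and collects per-step groups in a list joined once at the end
-- instead of A's per-letter appends (objective: alternative — O(P) selection per step vs O(P log P)).

-- ===== PORT A =====
-- get_sorted_index(seq) = sorted(range(len(seq)), key=lambda i: -seq[i]).
-- i ∈ range(len(seq)) is always in range, so seq[i] is ported exactly by getD.
def pvGetSortedIndex (seq : List Int) : List Nat :=
  PySem.List.sorted (List.range seq.length) (fun i => -(seq.getD i 0)) false

-- get_party(i) = chr(i + 65), as a one-character piece (strings are joined at the end).
def pvGetParty (i : Nat) : List Char := [Char.ofNat (i + 65)]

-- the while-loop of A; fuel strictly exceeds sum(remaining), which bounds the iteration count.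
-- The `| _ =>` arm is Python's ValueError (unpacking fewer than 2 indices, len < 2): outside Pre_.
def pvALoop : Nat → List Int → List (List Char) → List (List Char) × List Int
  | 0, rem, ev => (ev, rem)
  | f + 1, rem, ev =>
    if 0 < rem.sum then
      match pvGetSortedIndex rem with
      | i0 :: i1 :: _ =>
        let ev1 := if 0 < rem.getD i0 0 then ev ++ [pvGetParty i0] else ev
        let ev2 := if 0 < rem.getD i1 0 then ev1 ++ [pvGetParty i1] else ev1
        let ev3 := ev2 ++ [[' ']]
        let rem1 := rem.set i0 (rem.getD i0 0 + -1)
        let rem2 := rem1.set i1 (rem1.getD i1 0 + -1)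
        pvALoop f rem2 ev3
      | _ => (ev, rem)
    else (ev, rem)

def get_evacuation_plan (senates : List Int) : String :=
  let remaining := senates                                    -- senates[:]
  let st := pvALoop (senates.sum.toNat + 1) remaining []
  let plan := PySem.List.slice st.1.flatten none (some (-1))  -- ''.join(evacuation)[:-1]
  -- reading the second-to-last character of plan: IndexError when len(plan) < 2 — outside Pre_,
  -- where the default is never read
  let plan2 :=
    if PySem.List.pyGetD plan (-2) ' ' = ' ' then
      PySem.List.slice plan none (some (-3)) ++ [' ']
        ++ [PySem.List.pyGetD plan (-3) ' '] ++ [PySem.List.pyGetD plan (-1) ' ']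
    else plan
  String.ofList plan2

-- ===== PORT B =====
-- one step of Source B's single pass over enumerate(rem) maintaining the two leaders
-- ((i0, c0), (i1, c1)); `none` is Python's None sentinel, index -1 the initial i0/i1.
def pvTop2Step (s : (Int × Option Int) × (Int × Option Int)) (p : Int × Int) :
    (Int × Option Int) × (Int × Option Int) :=
  match s, p with
  | ((i0, c0), (i1, c1)), (i, c) =>
    match c0 with
    | none => ((i, some c), (i0, c0))
    | some v0 =>
      if v0 < c then ((i, some c), (i0, c0))
      else
        match c1 with
        | none => ((i0, c0), (i, some c))
        | some v1 => if v1 < c then ((i0, c0), (i, some c)) else ((i0, c0), (i1, c1))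

-- the while-loop of Source B; fuel strictly exceeds sum(rem), which bounds the iteration count.
def pvBLoop : Nat → List Int → List (List Char) → List (List Char) × List Int
  | 0, rem, groups => (groups, rem)
  | f + 1, rem, groups =>
    if 0 < rem.sum then
      let s := (PySem.List.enumerate rem 0).foldl pvTop2Step ((-1, none), (-1, none))
      let i0 := s.1.1
      let i1 := s.2.1
      let g : List Char :=
        (match s.1.2 with
         | some v => if 0 < v then [Char.ofNat (i0 + 65).toNat] else []
         | none => []) ++
        (match s.2.2 with
         | some v => if 0 < v then [Char.ofNat (i1 + 65).toNat] else []
         | none => [])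
      let rem1 := PySem.List.pySetD rem i0 (PySem.List.pyGetD rem i0 0 - 1)
      let rem2 := PySem.List.pySetD rem1 i1 (PySem.List.pyGetD rem1 i1 0 - 1)
      pvBLoop f rem2 (groups ++ [g])
    else (groups, rem)

def get_evacuation_plan_alt (senates : List Int) : String :=
  let st := pvBLoop (senates.sum.toNat + 1) senates []
  let plan := PySem.Chars.join [' '] st.1                     -- ' '.join(groups)
  -- reading the second-to-last character of plan: IndexError when len(plan) < 2 — outside Pre_,
  -- where the default is never read
  let plan2 :=
    if PySem.List.pyGetD plan (-2) ' ' = ' ' then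
      PySem.List.slice plan none (some (-3)) ++ [' ']
        ++ [PySem.List.pyGetD plan (-3) ' '] ++ [PySem.List.pyGetD plan (-1) ' ']
    else plan
  String.ofList plan2

-- ===== PRECONDITION & SPEC =====
-- Pre_ is exactly the set of inputs on which A returns normally: A raises on fewer than two
-- parties (ValueError/IndexError), and on inputs whose evacuation string has fewer than two
-- characters — a non-positive total, or a total of at most 2 held by fewer than two positive
-- parties — where reading the second-to-last character is an IndexError.  No input on which A
-- returns is excluded.
def Pre_get_evacuation_plan (senates : List Int) : Prop :=
  2 ≤ senates.length ∧ 0 < senates.sum ∧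
    (3 ≤ senates.sum ∨ 2 ≤ senates.countP (fun x => decide (0 < x)))
instance (senates : List Int) : Decidable (Pre_get_evacuation_plan senates) := by
  unfold Pre_get_evacuation_plan; infer_instance

def pvWitness_get_evacuation_plan : List Int := [2, 3, 2]

def Spec_get_evacuation_plan (senates : List Int) (out : String) : Prop := out = get_evacuation_plan_alt senates
instance (senates : List Int) (out : String) : Decidable (Spec_get_evacuation_plan senates out) := by unfold Spec_get_evacuation_plan; infer_instance

-- ===== CLAIM (what is proved, stated in full; the proofs are below) =====
def Claim_equal_get_evacuation_plan : Prop := ∀ (senates : List Int), Dom_get_evacuation_plan senates → Pre_get_evacuation_plan senates → Spec_get_evacuation_plan senates (get_evacuation_plan senates)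

-- ===== LEMMAS AND PROOFS =====

def pvCh (i : Nat) : Char := Char.ofNat (i + 65)

-- each group followed by a trailing space, flattened to characters (shape of A's joined string)

def pvFlat (gs : List (List Char)) : List Char := gs.flatMap (fun g => g ++ [' '])

-- A's evacuation list corresponding to a list of two-letter groups

def pvEvOf (gs : List (List Char)) : List (List Char) :=
  gs.flatMap (fun g => g.map (fun c => [c]) ++ [[' ']])

-- every group is two party letters

def pvBf (rem : List Int) (a b : Nat) : Bool :=
  decide ((-(rem.getD a 0)) < (-(rem.getD b 0)))

-- the two-slot shadow of insertion into a sorted list: what happens to the first two places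

def pvG2 (bf : Nat → Nat → Bool) (s : List Nat) (x : Nat) : List Nat :=
  match s with
  | [] => [x]
  | [a] => if bf x a then [x, a] else [a, x]
  | a :: b :: _ => if bf x a then [x, a] else if bf x b then [a, x] else [a, b]

-- embed a ≤2-slot index list as B's fold state

def pvToB (rem : List Int) (s : List Nat) : (Int × Option Int) × (Int × Option Int) :=
  match s with
  | [] => ((-1, none), (-1, none))
  | [a] => (((a : Int), some (rem.getD a 0)), (-1, none))
  | a :: b :: _ => (((a : Int), some (rem.getD a 0)), ((b : Int), some (rem.getD b 0)))

def pvInv (bf : Nat → Nat → Bool) (p s : List Nat) : Prop :=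
  (p = [] ∧ s = []) ∨ (∃ a, p = [a] ∧ s = [a]) ∨
  (2 ≤ p.length ∧ ∃ a b, s = [a, b] ∧ a ∈ p ∧ b ∈ p ∧ a ≠ b ∧
    (∀ j ∈ p, bf j a = false) ∧ (∀ j ∈ p, j ≠ a → bf j b = false))

lemma pv_take2_insertBy (bf : Nat → Nat → Bool) (x : Nat) (acc : List Nat) :
    (PySem.List.insertBy bf x acc).take 2 = pvG2 bf (acc.take 2) x := by
  match acc with
  | [] => simp [PySem.List.insertBy, pvG2]
  | [a] => simp [PySem.List.insertBy, pvG2]; split <;> simp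
  | a :: b :: t =>
    by_cases h1 : bf x a <;> by_cases h2 : bf x b <;>
      simp [PySem.List.insertBy, pvG2, h1, h2]

lemma pv_take2_foldl (bf : Nat → Nat → Bool) (xs : List Nat) :
    ∀ acc, ((xs.foldl (fun acc x => PySem.List.insertBy bf x acc) acc).take 2)
      = xs.foldl (pvG2 bf) (acc.take 2) := by
  induction xs with
  | nil => intro acc; simp
  | cons x t ih =>
    intro acc
    rw [List.foldl_cons, List.foldl_cons, ih, pv_take2_insertBy]

lemma pv_sorted_take2 (rem : List Int) :
    (pvGetSortedIndex rem).take 2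
      = (List.range rem.length).foldl (pvG2 (pvBf rem)) [] := by
  unfold pvGetSortedIndex PySem.List.sorted
  simp only [Bool.false_eq_true, if_false]
  rw [pv_take2_foldl]
  rfl

lemma pv_g2_inv (bf : Nat → Nat → Bool)
    (hirr : ∀ a, bf a a = false)
    (hasym : ∀ a b, bf a b = true → bf b a = false)
    (htrans : ∀ a b c, bf a b = false → bf b c = false → bf a c = false) :
    ∀ (l p s : List Nat), (p ++ l).Nodup → pvInv bf p s →
      pvInv bf (p ++ l) (l.foldl (pvG2 bf) s) := by
  intro l
  induction l with
  | nil => intro p s hnd hinv; simpa using hinv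
  | cons x t ih =>
    intro p s hnd hinv
    have hx : x ∉ p := by
      rcases List.nodup_append.mp hnd with ⟨-, -, hdisj⟩
      intro hxp; exact hdisj x hxp x (by simp) rfl
    have hstep : pvInv bf (p ++ [x]) (pvG2 bf s x) := by
      rcases hinv with ⟨hp, hs⟩ | ⟨a, hp, hs⟩ | ⟨hlen, a, b, hs, ha, hb, hab, hmax, hmax2⟩
      · subst hp; subst hs
        exact Or.inr (Or.inl ⟨x, by simp, rfl⟩)
      · subst hp; subst hs
        have hax : a ≠ x := by intro h; exact hx (by simp [h])
        refine Or.inr (Or.inr ⟨by simp, ?_⟩)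
        by_cases h1 : bf x a
        · refine ⟨x, a, by simp [pvG2, h1], by simp, by simp, hax.symm, ?_, ?_⟩
          · intro j hj; simp at hj
            rcases hj with hj | hj <;> subst hj
            · exact hasym _ _ h1
            · exact hirr _
          · intro j hj hjx; simp at hj
            rcases hj with hj | hj <;> subst hj
            · exact hirr _
            · exact absurd rfl hjx
        · refine ⟨a, x, by simp [pvG2, h1], by simp, by simp, hax, ?_, ?_⟩
          · intro j hj; simp at hj
            rcases hj with hj | hj <;> subst hj
            · exact hirr _
            · exact Bool.eq_false_iff.mpr h1
          · intro j hj hja; simp at hj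
            rcases hj with hj | hj <;> subst hj
            · exact absurd rfl hja
            · exact hirr _
      · subst hs
        refine Or.inr (Or.inr ⟨by simpa using Nat.le_succ_of_le hlen, ?_⟩)
        have hxa : x ≠ a := by intro h; exact hx (h ▸ ha)
        have hxb : x ≠ b := by intro h; exact hx (h ▸ hb)
        by_cases h1 : bf x a
        · refine ⟨x, a, by simp [pvG2, h1], by simp, by simp [ha], hxa, ?_, ?_⟩
          · intro j hj; simp at hj
            rcases hj with hj | hj
            · exact htrans j a x (hmax j hj) (hasym _ _ h1)
            · subst hj; exact hirr _
          · intro j hj hjx; simp at hj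
            rcases hj with hj | hj
            · exact hmax j hj
            · subst hj; exact absurd rfl hjx
        · by_cases h2 : bf x b
          · refine ⟨a, x, by simp [pvG2, h1, h2], by simp [ha], by simp, hxa.symm, ?_, ?_⟩
            · intro j hj; simp at hj
              rcases hj with hj | hj
              · exact hmax j hj
              · subst hj; exact Bool.eq_false_iff.mpr h1
            · intro j hj hja; simp at hj
              rcases hj with hj | hj
              · exact htrans j b x (hmax2 j hj hja) (hasym _ _ h2)
              · subst hj; exact hirr _
          · refine ⟨a, b, by simp [pvG2, h1, h2], by simp [ha], by simp [hb], hab, ?_, ?_⟩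
            · intro j hj; simp at hj
              rcases hj with hj | hj
              · exact hmax j hj
              · subst hj; exact Bool.eq_false_iff.mpr h1
            · intro j hj hja; simp at hj
              rcases hj with hj | hj
              · exact hmax2 j hj hja
              · subst hj; exact Bool.eq_false_iff.mpr h2
    have hres := ih (p ++ [x]) (pvG2 bf s x) (by simpa using hnd) hstep
    simpa using hres

lemma pv_bf_irrefl (rem : List Int) : ∀ a, pvBf rem a a = false := by
  intro a; simp [pvBf]

lemma pv_bf_asym (rem : List Int) : ∀ a b, pvBf rem a b = true → pvBf rem b a = false := by
  intro a b; simp [pvBf]; omega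

lemma pv_bf_trans (rem : List Int) :
    ∀ a b c, pvBf rem a b = false → pvBf rem b c = false → pvBf rem a c = false := by
  intro a b c; simp [pvBf]; omega

lemma pv_step_toB (rem : List Int) (s : List Nat) (x : Nat) :
    pvTop2Step (pvToB rem s) (((x : Int), rem.getD x 0)) = pvToB rem (pvG2 (pvBf rem) s x) := by
  match s with
  | [] => simp [pvTop2Step, pvToB, pvG2]
  | [a] =>
    by_cases h : rem.getD a 0 < rem.getD x 0 <;>
      simp only [List.getD_eq_getElem?_getD] at h <;>
      simp [pvTop2Step, pvToB, pvG2, pvBf, h]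
  | a :: b :: t =>
    by_cases h1 : rem.getD a 0 < rem.getD x 0 <;>
      by_cases h2 : rem.getD b 0 < rem.getD x 0 <;>
      simp only [List.getD_eq_getElem?_getD] at h1 h2 <;>
      simp [pvTop2Step, pvToB, pvG2, pvBf, h1, h2]

lemma pv_fold_toB (rem : List Int) : ∀ (l : List Nat) (s : List Nat),
    ((l.map (fun (j : Nat) => ((j : Int), rem.getD j 0))).foldl pvTop2Step (pvToB rem s))
      = pvToB rem (l.foldl (pvG2 (pvBf rem)) s) := by
  intro l
  induction l with
  | nil => intro s; simp
  | cons x t ih =>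
    intro s
    simp only [List.map_cons, List.foldl_cons, pv_step_toB]
    exact ih _

lemma pv_enum_fold (rem : List Int) :
    (PySem.List.enumerate rem 0).foldl pvTop2Step ((-1, none), (-1, none))
      = pvToB rem ((List.range rem.length).foldl (pvG2 (pvBf rem)) []) := by
  rw [PySem.List.enumerate_eq_map_pyRange rem 0, PySem.List.len_eq,
    PySem.List.pyRange_zero_natCast, List.map_map]
  have : ((fun j => (j, PySem.List.pyGetD rem j 0)) ∘ fun k : Nat => (k : Int))
      = fun (j : Nat) => ((j : Int), rem.getD j 0) := by
    funext j; simp [PySem.List.pyGetD_natCast]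
  rw [this]
  exact pv_fold_toB rem _ []

lemma pv_take2_cases {α : Type} (l : List α) (a b : α) (h : l.take 2 = [a, b]) :
    ∃ t, l = a :: b :: t := by
  match l with
  | [] => simp at h
  | [x] => simp at h
  | x :: y :: t => simp at h; exact ⟨t, by simp [h.1, h.2]⟩

-- the selection both programs make on a state with at least two parties

lemma pv_selection (rem : List Int) (hn : 2 ≤ rem.length) :
    ∃ i0 i1 t, pvGetSortedIndex rem = i0 :: i1 :: t ∧
      ((PySem.List.enumerate rem 0).foldl pvTop2Step ((-1, none), (-1, none)))
        = (((i0 : Int), some (rem.getD i0 0)), ((i1 : Int), some (rem.getD i1 0))) ∧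
      i0 < rem.length ∧ i1 < rem.length ∧ i0 ≠ i1 ∧
      (∀ j, j < rem.length → rem.getD j 0 ≤ rem.getD i0 0) ∧
      (∀ j, j < rem.length → j ≠ i0 → rem.getD j 0 ≤ rem.getD i1 0) := by
  have hinv := pv_g2_inv (pvBf rem) (pv_bf_irrefl rem) (pv_bf_asym rem) (pv_bf_trans rem)
    (List.range rem.length) [] [] (by simp [List.nodup_range]) (Or.inl ⟨rfl, rfl⟩)
  rw [List.nil_append] at hinv
  rcases hinv with ⟨hp, -⟩ | ⟨a, hp, -⟩ | ⟨-, a, b, hs, ha, hb, hab, hmax, hmax2⟩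
  · exfalso
    have h1 : rem.length = 0 := by simpa using congrArg List.length hp
    omega
  · exfalso
    have h1 : rem.length = 1 := by simpa using congrArg List.length hp
    omega
  · rw [List.mem_range] at ha hb
    obtain ⟨t, ht⟩ := pv_take2_cases _ a b (by rw [pv_sorted_take2, hs])
    refine ⟨a, b, t, ht, ?_, ha, hb, hab, ?_, ?_⟩
    · rw [pv_enum_fold, hs]; rfl
    · intro j hj
      have := hmax j (List.mem_range.mpr hj)
      simpa [pvBf] using this
    · intro j hj hja
      have := hmax2 j (List.mem_range.mpr hj) hja
      simpa [pvBf] using this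

lemma pv_getD_set_ne (L : List Int) (i j : Nat) (v : Int) (h : j ≠ i) :
    (L.set i v).getD j 0 = L.getD j 0 := by
  simp [List.getD_eq_getElem?_getD, List.getElem?_set_ne (by omega : i ≠ j)]

lemma pv_sum_set (L : List Int) (i : Nat) (v : Int) (h : i < L.length) :
    (L.set i v).sum = L.sum - L.getD i 0 + v := by
  rw [List.sum_set]
  have h2 : L.sum = (L.take i).sum + ((L.getD i 0) + (L.drop (i+1)).sum) := by
    conv_lhs => rw [← List.take_append_drop i L]
    rw [List.sum_append, List.drop_eq_getElem_cons h, List.sum_cons,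
      List.getD_eq_getElem?_getD, List.getElem?_eq_getElem h]
    simp
  rw [if_pos h, h2]; ring

lemma pv_flatten_map_singleton (g : List Char) : (List.map (fun c => [c]) g).flatten = g := by
  induction g with
  | nil => rfl
  | cons c t ih => simp [ih]

lemma pv_flatten_evOf (gs : List (List Char)) : (pvEvOf gs).flatten = pvFlat gs := by
  induction gs with
  | nil => rfl
  | cons g t ih =>
    simp [pvEvOf, pvFlat, pv_flatten_map_singleton] at ih ⊢
    simp [ih]

lemma pv_join_eq (gs : List (List Char)) :
    PySem.Chars.join [' '] gs = (pvFlat gs).dropLast := by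
  induction gs with
  | nil => rfl
  | cons g t ih =>
    match t with
    | [] => simp [PySem.Chars.join, pvFlat, List.intercalate]
    | h :: t2 =>
      simp only [PySem.Chars.join, List.intercalate] at ih ⊢
      rw [List.intersperse_cons₂, List.flatten_cons, List.flatten_cons, ih]
      have hne : pvFlat (h :: t2) ≠ [] := by simp [pvFlat]
      have : pvFlat (g :: h :: t2) = (g ++ [' ']) ++ pvFlat (h :: t2) := by
        simp [pvFlat]
      rw [this, List.dropLast_append_of_ne_nil hne]
      simp

lemma pv_aloop_stop (f : Nat) (rem : List Int) (ev : List (List Char))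
    (h : rem.sum ≤ 0) : pvALoop f rem ev = (ev, rem) := by
  cases f with
  | zero => rfl
  | succ f =>
    have : ¬ 0 < rem.sum := by omega
    simp [pvALoop, this]

-- ---- the main loop correspondence ----

lemma pv_loop_main : ∀ (fa fb : Nat) (rem : List Int) (ev gs : List (List Char)),
    2 ≤ rem.length →
    rem.sum.toNat < fa → rem.sum.toNat < fb →
    ∃ gs' rem',
      pvALoop fa rem ev = (ev ++ pvEvOf gs', rem') ∧
      pvBLoop fb rem gs = (gs ++ gs', rem') := by
  intro fa
  induction fa with
  | zero => intro fb rem ev gs hn hfa hfb; omega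
  | succ fa ih =>
    intro fb rem ev gs hn hfa hfb
    by_cases hs : 0 < rem.sum
    · cases fb with
      | zero => omega
      | succ fb =>
        obtain ⟨i0, i1, t, hsort, hfold, h0, h1, hne01, hmax, hmax2⟩ := pv_selection rem hn
        set rem1 := rem.set i0 (rem.getD i0 0 + -1) with hrem1
        set rem2 := rem1.set i1 (rem1.getD i1 0 + -1) with hrem2
        have hr1i1 : rem1.getD i1 0 = rem.getD i1 0 :=
          pv_getD_set_ne rem i0 i1 _ (Ne.symm hne01)
        have hlen2 : rem2.length = rem.length := by simp [hrem2, hrem1]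
        have hsum1 : rem1.sum = rem.sum - 1 := by
          rw [hrem1, pv_sum_set rem i0 _ h0]; ring
        have hsum2 : rem2.sum = rem.sum - 2 := by
          rw [hrem2, pv_sum_set rem1 i1 _ (by simp [hrem1]; omega), hr1i1, hsum1]; ring
        set g : List Char :=
          (if 0 < rem.getD i0 0 then [pvCh i0] else []) ++
          (if 0 < rem.getD i1 0 then [pvCh i1] else []) with hg
        have hA : pvALoop (fa + 1) rem ev = pvALoop fa rem2 (ev ++ g.map (fun c => [c]) ++ [[' ']]) := by
          by_cases e2 : 0 < rem.getD i0 0 <;> by_cases e3 : 0 < rem.getD i1 0 <;>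
            [skip; skip; skip; skip] <;>
            · rw [hg]
              simp only [List.getD_eq_getElem?_getD] at e2 e3
              simp [pvALoop, hsort, hs, e2, e3, pvGetParty, pvCh, hrem2, hrem1,
                List.getD_eq_getElem?_getD]
        have hchar : ∀ m : Nat, Char.ofNat ((m : Int) + 65).toNat = pvCh m := by
          intro m
          have : ((m : Int) + 65).toNat = m + 65 := by omega
          rw [this, pvCh]
        have hBstep : pvBLoop (fb + 1) rem gs = pvBLoop fb rem2 (gs ++ [g]) := by
          simp only [pvBLoop, if_pos hs, hfold]
          rw [hchar i0, hchar i1]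
          simp only [PySem.List.pySetD_natCast, PySem.List.pyGetD_natCast]
          rw [hg, hrem2, hrem1]
          norm_num [sub_eq_add_neg]
        obtain ⟨gs', rem', hAr, hBr⟩ :=
          ih fb rem2 (ev ++ g.map (fun c => [c]) ++ [[' ']]) (gs ++ [g])
            (by omega) (by omega) (by omega)
        refine ⟨g :: gs', rem', ?_, ?_⟩
        · rw [hA, hAr]; simp [pvEvOf]
        · rw [hBstep, hBr]; simp
    · refine ⟨[], rem, ?_, ?_⟩
      · rw [pv_aloop_stop (fa + 1) rem ev (by omega)]; simp [pvEvOf]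
      · cases fb with
        | zero => simp [pvBLoop]
        | succ fb => simp [pvBLoop, hs]

-- ===== VERDICT (by name: the statement is the Claim_ definition above) =====
theorem get_evacuation_plan_spec : Claim_equal_get_evacuation_plan := by
  intro senates _ hpre
  obtain ⟨hn, hs, -⟩ := hpre
  unfold Spec_get_evacuation_plan
  obtain ⟨gs', rem', hA, hB⟩ :=
    pv_loop_main (senates.sum.toNat + 1) (senates.sum.toNat + 1) senates [] [] hn
      (by omega) (by omega)
  simp only [get_evacuation_plan, get_evacuation_plan_alt, hA, hB, List.nil_append]
  rw [pv_flatten_evOf, PySem.List.slice_to_neg_one, ← pv_join_eq]
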